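-- pv_equiv track=rewrite | github.com/martafix1/woodCalendarSolver | martinovy_warcrimes/preprocessing.py | find_invalid_offsets
-- ===== SOURCE A (Python) =====
-- def find_invalid_offsets(anchor_shape, other_shape):
--     invalid_offsets = set()
--     for i in range(len(anchor_shape)):
--         for a, o in zip(anchor_shape[i:], other_shape):
--             if a + o == 2:
--                 invalid_offsets.add(i)
--                 break
--     return invalid_offsets
-- ===== SOURCE B (Python) =====
-- def find_invalid_offsets(anchor_shape, other_shape):
--     n = len(anchor_shape)
--     pos = {}
--     for p, a in enumerate(anchor_shape):
--         pos.setdefault(a, []).append(p)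
--     bad = [False] * n
--     for j, o in enumerate(other_shape):
--         for p in pos.get(2 - o, ()):
--             if p >= j:
--                 bad[p - j] = True
--     return {i for i in range(n) if bad[i]}
-- ===== Notes on version B (the rewrite author's own statement) =====
-- stated objective: faster
-- what changed: Instead of scanning the overlap at every offset i (nested loops with a break), B builds a value-to-positions index over anchor_shape once, then for each j in other_shape looks up the positions of 2 - other_shape[j] and marks the offsets p - j in a boolean table, finally collecting the marked offsets.
import Mathlib
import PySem

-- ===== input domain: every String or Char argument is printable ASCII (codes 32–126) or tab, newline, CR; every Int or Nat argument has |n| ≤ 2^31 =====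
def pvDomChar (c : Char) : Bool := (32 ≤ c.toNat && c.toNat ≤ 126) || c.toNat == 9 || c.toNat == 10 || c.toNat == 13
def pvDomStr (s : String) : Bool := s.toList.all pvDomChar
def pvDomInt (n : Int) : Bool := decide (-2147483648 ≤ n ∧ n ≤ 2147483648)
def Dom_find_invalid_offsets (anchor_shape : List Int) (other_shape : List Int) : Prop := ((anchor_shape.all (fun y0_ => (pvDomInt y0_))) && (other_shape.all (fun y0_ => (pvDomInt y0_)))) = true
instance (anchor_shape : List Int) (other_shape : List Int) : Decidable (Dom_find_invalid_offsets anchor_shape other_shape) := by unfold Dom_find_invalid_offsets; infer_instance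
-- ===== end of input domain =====

-- B replaces A's quadratic shift-by-shift scan by a value→positions index over anchor_shape plus a
-- boolean offset table (objective: faster on inputs with few matching pairs; same worst case).


-- ===== PORT A =====
-- inner loop: 'for a, o in zip(anchor_shape[i:], other_shape): if a + o == 2: …add(i); break'
def pvLoopA (s : List Int) (i : Int) : List (Int × Int) → List Int
  | [] => s
  | (a, o) :: rest => if a + o == 2 then PySem.Set.add s i else pvLoopA s i rest

def find_invalid_offsets (anchor_shape : List Int) (other_shape : List Int) : List Int :=
  (PySem.List.pyRange 0 (anchor_shape.length : Int) 1).foldl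
    (fun invalid_offsets i =>
      pvLoopA invalid_offsets i ((PySem.List.slice anchor_shape (some i) none).zip other_shape))
    PySem.Set.empty

-- ===== PORT B =====
-- 'for p in pos.get(2 - o, ()): if p >= j: bad[p - j] = True'   (index p - j is in range whenever it is ≥ 0)
def pvMark (j : Int) (ps : List Int) (bad : List Bool) : List Bool :=
  ps.foldl (fun bad p => if j ≤ p then PySem.List.pySetD bad (p - j) true else bad) bad

-- 'for j, o in enumerate(other_shape): …'
def pvLoopJ (pos : PySem.Dict Int (List Int)) : Int → List Int → List Bool → List Bool
  | _, [], bad => bad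
  | j, o :: rest, bad => pvLoopJ pos (j + 1) rest (pvMark j (pos.getD (2 - o) []) bad)

def find_invalid_offsets_alt (anchor_shape : List Int) (other_shape : List Int) : List Int :=
  let n := anchor_shape.length
  -- 'for p, a in enumerate(anchor_shape): pos.setdefault(a, []).append(p)'
  let pos := (PySem.List.enumerate anchor_shape 0).foldl
    (fun d pa => d.modify pa.2 [] (fun l => l ++ [pa.1])) PySem.Dict.empty
  let bad := pvLoopJ pos 0 other_shape (List.replicate n false)
  -- '{i for i in range(n) if bad[i]}'  (bad[i] is always in range: i < n = len(bad))
  PySem.Set.ofList ((PySem.List.pyRange 0 (n : Int) 1).filter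
    (fun i => PySem.List.pyGetD bad i false))

-- ===== PRECONDITION & SPEC =====
def Spec_find_invalid_offsets (anchor_shape : List Int) (other_shape : List Int) (out : List Int) : Prop := out = find_invalid_offsets_alt anchor_shape other_shape
instance (anchor_shape : List Int) (other_shape : List Int) (out : List Int) : Decidable (Spec_find_invalid_offsets anchor_shape other_shape out) := by unfold Spec_find_invalid_offsets; infer_instance

-- ===== CLAIM (what is proved, stated in full; the proofs are below) =====
def Claim_equal_find_invalid_offsets : Prop := ∀ (anchor_shape : List Int) (other_shape : List Int), Dom_find_invalid_offsets anchor_shape other_shape → Spec_find_invalid_offsets anchor_shape other_shape (find_invalid_offsets anchor_shape other_shape)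

-- ===== LEMMAS AND PROOFS =====
theorem pvLoopA_eq (pairs : List (Int × Int)) (s : List Int) (i : Int) :
    pvLoopA s i pairs = if pairs.any (fun p => p.1 + p.2 == 2) then PySem.Set.add s i else s := by
  induction pairs with
  | nil => simp [pvLoopA]
  | cons p rest ih =>
    obtain ⟨a, o⟩ := p
    by_cases h : a + o == 2
    · simp [pvLoopA, h]
    · simp only [pvLoopA, h, if_false, Bool.false_eq_true, ih, List.any_cons, Bool.false_or]

theorem foldl_setadd (P : Int → Bool) : ∀ (l s : List Int), l.Nodup → (∀ x ∈ l, x ∉ s) →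
    l.foldl (fun s i => if P i then PySem.Set.add s i else s) s = s ++ l.filter P := by
  intro l
  induction l with
  | nil => simp
  | cons a l ih =>
    intro s hnd hfresh
    simp only [List.foldl_cons, List.filter_cons]
    by_cases hP : P a
    · rw [if_pos hP, if_pos hP, PySem.Set.add_of_not_mem (hfresh a (by simp))]
      rw [ih (s ++ [a]) hnd.of_cons ?_]
      · simp
      · intro x hx
        simp only [List.mem_append, List.mem_singleton]
        rintro (h1 | rfl)
        · exact hfresh x (by simp [hx]) h1
        · exact (List.nodup_cons.mp hnd).1 hx
    · rw [if_neg hP, if_neg hP]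
      exact ih s hnd.of_cons (fun x hx => hfresh x (by simp [hx]))

theorem length_pvMark (j : Int) (ps : List Int) (bad : List Bool) :
    (pvMark j ps bad).length = bad.length := by
  induction ps generalizing bad with
  | nil => rfl
  | cons p rest ih =>
    simp only [pvMark, List.foldl_cons] at *
    rw [ih]
    split
    · rw [PySem.List.length_pySetD]
    · rfl

theorem pvMark_getD (j : Int) (ps : List Int) : ∀ (bad : List Bool) (k : Nat), k < bad.length →
    (pvMark j ps bad).getD k false = (bad.getD k false || ps.any (fun p => p == j + (k : Int))) := by
  induction ps with
  | nil => intro bad k hk; simp [pvMark]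
  | cons p rest ih =>
    intro bad k hk
    simp only [pvMark, List.foldl_cons] at *
    by_cases hj : j ≤ p
    · rw [if_pos hj]
      rw [ih _ k (by rw [PySem.List.length_pySetD]; exact hk)]
      rw [PySem.List.pySetD_of_nonneg bad true (by omega)]
      rcases eq_or_ne p (j + (k : Int)) with he | hne
      · have : (p - j).toNat = k := by omega
        rw [this]
        simp [List.getD_eq_getElem?_getD, List.getElem?_set_self (by omega), he]
      · have hne2 : (p - j).toNat ≠ k := by omega
        rw [List.getD_eq_getElem?_getD, List.getElem?_set_ne hne2, ← List.getD_eq_getElem?_getD]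
        simp only [List.any_cons]
        have : (p == j + (k : Int)) = false := by simp [hne]
        rw [this]
        simp
    · rw [if_neg hj]
      rw [ih _ k hk]
      have : (p == j + (k : Int)) = false := by simp; omega
      simp [this]

theorem pvLoopJ_getD (pos : PySem.Dict Int (List Int)) :
    ∀ (os : List Int) (j : Int) (bad : List Bool) (k : Nat), k < bad.length →
    ((pvLoopJ pos j os bad).getD k false = true ↔
      bad.getD k false = true ∨
      ∃ t < os.length, (j + (t : Int) + (k : Int)) ∈ pos.getD (2 - os.getD t 0) []) := by
  intro os
  induction os with
  | nil => intro j bad k hk; simp [pvLoopJ]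
  | cons o rest ih =>
    intro j bad k hk
    rw [pvLoopJ, ih (j + 1) _ k (by rw [length_pvMark]; exact hk)]
    rw [pvMark_getD j _ bad k hk]
    constructor
    · rintro (h | ⟨t, ht, hm⟩)
      · rcases Bool.or_eq_true_iff.mp h with h1 | h2
        · exact Or.inl h1
        · obtain ⟨p, hp, hpe⟩ := List.any_eq_true.mp h2
          refine Or.inr ⟨0, by simp, ?_⟩
          have : p = j + (k : Int) := by exact_mod_cast eq_of_beq hpe
          simpa [this.symm, Int.add_assoc] using hp
      · refine Or.inr ⟨t + 1, by simpa using ht, ?_⟩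
        have h1 : (j + 1 + (t : Int) + (k : Int)) = j + ((t : Int) + 1) + (k : Int) := by ring
        have h2 : (rest.getD t 0) = (o :: rest).getD (t + 1) 0 := by simp
        rw [h1, h2] at hm
        exact_mod_cast hm
    · rintro (h | ⟨t, ht, hm⟩)
      · exact Or.inl (by simp only [h, Bool.true_or])
      · match t with
        | 0 =>
          refine Or.inl ?_
          refine Bool.or_eq_true_iff.mpr (Or.inr (List.any_eq_true.mpr ⟨j + (k : Int), ?_, by simp⟩))
          simpa [Int.add_assoc] using hm
        | t + 1 =>
          refine Or.inr ⟨t, by simpa using ht, ?_⟩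
          have h1 : j + ((t : Int) + 1 : Int) + (k : Int) = j + 1 + (t : Int) + (k : Int) := by ring
          have h2 : ((o :: rest).getD (t + 1) 0) = rest.getD t 0 := by simp
          push_cast at hm ⊢
          rw [h1, h2] at hm
          exact hm

theorem pos_getD_mem (anchor : List Int) (v q : Int) :
    (q ∈ ((PySem.List.enumerate anchor 0).foldl
        (fun d pa => d.modify pa.2 [] (fun l => l ++ [pa.1])) PySem.Dict.empty).getD v []) ↔
    ∃ t : Nat, t < anchor.length ∧ q = (t : Int) ∧ anchor.getD t 0 = v := by
  have h1 : (PySem.List.enumerate anchor 0).foldl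
        (fun d pa => d.modify pa.2 [] (fun l => l ++ [pa.1])) PySem.Dict.empty
      = ((PySem.List.enumerate anchor 0).map (fun pa => (pa.2, pa.1))).foldl
        (fun d pr => d.modify pr.1 [] (fun l => l ++ [pr.2])) PySem.Dict.empty := by
    rw [List.foldl_map]
  rw [h1, PySem.Dict.getD_foldl_modify_append]
  rw [PySem.List.enumerate_eq_map_pyRange (d := 0)]
  simp only [PySem.Dict.getD_empty, List.nil_append, List.mem_map, List.mem_filter,
    List.map_map, List.mem_map, PySem.List.len_eq, Function.comp_apply, beq_iff_eq]
  constructor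
  · rintro ⟨pr, ⟨⟨j, hj, rfl⟩, hv⟩, rfl⟩
    rw [PySem.List.mem_pyRange_one] at hj
    obtain ⟨h0, hn⟩ := hj
    refine ⟨j.toNat, by omega, (Int.toNat_of_nonneg h0).symm, ?_⟩
    simp only at hv
    rw [PySem.List.pyGetD_eq_getElem anchor 0 h0 (by exact_mod_cast hn)] at hv
    rw [List.getD_eq_getElem _ _ (by omega)]
    exact hv
  · rintro ⟨t, ht, rfl, hv⟩
    refine ⟨(PySem.List.pyGetD anchor (t : Int) 0, (t : Int)), ⟨⟨(t : Int), ?_, rfl⟩, ?_⟩, rfl⟩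
    · rw [PySem.List.mem_pyRange_one]; omega
    · rw [PySem.List.pyGetD_natCast]; exact hv

theorem zipAny_iff (anchor other : List Int) (k : Nat) :
    ((((anchor.drop k).zip other).any (fun p => p.1 + p.2 == 2)) = true) ↔
    ∃ t : Nat, t < other.length ∧ k + t < anchor.length ∧
      anchor.getD (k + t) 0 + other.getD t 0 = 2 := by
  rw [List.any_eq_true]
  constructor
  · rintro ⟨x, hx, he⟩
    obtain ⟨t, ht, hxe⟩ := List.mem_iff_getElem.mp hx
    have htlen : t < (anchor.drop k).length ∧ t < other.length := by
      rw [List.length_zip] at ht; omega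
    refine ⟨t, htlen.2, by simp at htlen; omega, ?_⟩
    rw [List.getElem_zip] at hxe
    have h1 : (anchor.drop k)[t] = anchor[k + t]'(by simp at htlen; omega) := by
      rw [List.getElem_drop]
    rw [List.getD_eq_getElem _ _ (by simp at htlen; omega), List.getD_eq_getElem _ _ htlen.2]
    have := beq_iff_eq.mp he
    rw [← hxe] at this
    simp only [h1] at this
    exact this
  · rintro ⟨t, ht, hn, he⟩
    refine ⟨((anchor.drop k).zip other)[t]'(by rw [List.length_zip]; simp; omega),
      List.getElem_mem _, ?_⟩
    rw [List.getElem_zip]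
    simp only [beq_iff_eq]
    rw [List.getElem_drop]
    rw [List.getD_eq_getElem _ _ (by omega), List.getD_eq_getElem _ _ ht] at he
    exact he

theorem main_spec : ∀ (anchor other : List Int),
    find_invalid_offsets anchor other = find_invalid_offsets_alt anchor other := by
  intro anchor other
  unfold find_invalid_offsets find_invalid_offsets_alt
  have hfun : (fun (s : List Int) (i : Int) =>
      pvLoopA s i ((PySem.List.slice anchor (some i) none).zip other)) =
      (fun s i => if ((PySem.List.slice anchor (some i) none).zip other).any
          (fun p => p.1 + p.2 == 2) then PySem.Set.add s i else s) := by
    funext s i; exact pvLoopA_eq _ _ _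
  rw [hfun]
  rw [foldl_setadd _ _ _ (PySem.List.nodup_pyRange_one _ _)
    (by intro x _ hx; simp [PySem.Set.empty] at hx)]
  dsimp only
  rw [PySem.Set.ofList_eq_self_of_nodup _ ((PySem.List.nodup_pyRange_one _ _).filter _)]
  rw [show (PySem.Set.empty : List Int) ++ _ = _ from List.nil_append _]
  apply List.filter_congr
  intro i hi
  obtain ⟨h0, hn⟩ := PySem.List.mem_pyRange_one.mp hi
  rw [show i = ((i.toNat : Nat) : Int) from (Int.toNat_of_nonneg h0).symm]
  rw [PySem.List.slice_from_natCast, PySem.List.pyGetD_natCast]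
  rw [Bool.eq_iff_iff, zipAny_iff]
  rw [pvLoopJ_getD _ other 0 (List.replicate anchor.length false) i.toNat
    (by simp; omega)]
  have hrep : (List.replicate anchor.length false).getD i.toNat false = false := by
    rw [List.getD_eq_getElem?_getD, List.getElem?_replicate]
    split <;> rfl
  simp only [hrep, Bool.false_eq_true, false_or, pos_getD_mem]
  constructor
  · rintro ⟨t, ht, hlt, he⟩
    exact ⟨t, ht, ⟨i.toNat + t, hlt, by push_cast; ring, by omega⟩⟩
  · rintro ⟨t, ht, u, hu, he1, he2⟩
    have : u = i.toNat + t := by omega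
    subst this
    exact ⟨t, ht, hu, by omega⟩

-- ===== VERDICT (by name: the statement is the Claim_ definition above) =====
theorem find_invalid_offsets_spec : Claim_equal_find_invalid_offsets := by
  intro anchor other _
  unfold Spec_find_invalid_offsets
  exact main_spec anchor other
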